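-- pv_equiv track=rewrite | github.com/bolatov/adventofcode | 2024/day_05.py | get_correct_orders
-- ===== SOURCE A (Python) =====
-- def in_right_order(rules, mp):
--     # check if rules are respected
--     for rule_key, rule_nums in rules.items():
--         if rule_key not in mp:
--             continue
--         rule_key_positions = mp[rule_key]
--         for left_pos in rule_key_positions:
--             for rule_num in rule_nums:
--                 if rule_num not in mp:
--                     continue
--                 for right_pos in mp[rule_num]:
--                     if left_pos > right_pos:
--                         return [left_pos, right_pos]
--     return []
--
-- def build_mp(arr):
--     mp = {}
--     for i in range(len(arr)):
--         pos = mp.get(arr[i], [])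
--         pos.append(i)
--         mp[arr[i]] = pos
--     return mp
--
-- def get_correct_orders(rules, matrix):
--     result = []
--     for matrix_row in range(len(matrix)):
--         arr = matrix[matrix_row]
--         mp = build_mp(arr)
--         if in_right_order(rules, mp) == []:
--             result.append(matrix_row)
--     return result
-- ===== SOURCE B (Python) =====
-- def get_correct_orders(rules, matrix):
--     # One left-to-right pass per row with a 'seen' set: a row is wrong iff some
--     # page v has a rule successor that already occurred before v.
--     def row_ok(arr):
--         seen = set()
--         for v in arr:
--             for n in rules.get(v, ()):
--                 if n in seen:
--                     return False
--             seen.add(v)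
--         return True
--     return [row for row, arr in enumerate(matrix) if row_ok(arr)]
-- ===== Notes on version B (the rewrite author's own statement) =====
-- stated objective: faster
-- what changed: Instead of building a value->all-positions dict per row and scanning every rule with four nested loops over position lists, B makes one left-to-right pass per row with a growing 'seen' set and rejects the row as soon as some page's rule successors intersect the pages already seen; rows are collected by enumerate+filter instead of an index counter.
import Mathlib
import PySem

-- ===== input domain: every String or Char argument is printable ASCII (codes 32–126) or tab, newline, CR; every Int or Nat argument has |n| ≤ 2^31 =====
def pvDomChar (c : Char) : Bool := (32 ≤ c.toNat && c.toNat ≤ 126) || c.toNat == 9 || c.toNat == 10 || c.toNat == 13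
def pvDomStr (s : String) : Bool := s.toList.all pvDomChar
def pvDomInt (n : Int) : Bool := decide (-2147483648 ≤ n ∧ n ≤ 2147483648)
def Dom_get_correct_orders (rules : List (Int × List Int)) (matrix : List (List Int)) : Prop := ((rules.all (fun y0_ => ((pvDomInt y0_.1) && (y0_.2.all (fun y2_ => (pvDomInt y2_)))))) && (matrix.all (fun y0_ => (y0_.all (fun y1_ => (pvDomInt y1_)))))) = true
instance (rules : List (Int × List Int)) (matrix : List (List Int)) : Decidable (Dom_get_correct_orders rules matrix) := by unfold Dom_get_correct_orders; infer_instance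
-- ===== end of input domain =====

-- B replaces A's per-row value->positions dict and four nested rule/position loops
-- by one left-to-right pass per row with a growing 'seen' set (faster: only pages
-- present in the row are looked up against the rules).

-- ===== PORT A =====
-- build_mp: value -> list of its positions (Python: for i in range(len(arr)))
def buildMp (arr : List Int) : PySem.Dict Int (List Int) :=
  (arr.foldl (fun (s : PySem.Dict Int (List Int) × Int) x =>
      (s.1.insert x (s.1.getD x [] ++ [s.2]), s.2 + 1)) (PySem.Dict.empty, 0)).1

-- in_right_order: nested loops with early return, ported as nested findSome?
def inRightOrder (rules : PySem.Dict Int (List Int)) (mp : PySem.Dict Int (List Int)) : List Int :=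
  match rules.items.findSome? (fun kv =>
    match mp.get? kv.1 with
    | none => none
    | some poss =>
      poss.findSome? (fun lp =>
        kv.2.findSome? (fun rn =>
          match mp.get? rn with
          | none => none
          | some rposs =>
            rposs.findSome? (fun rp => if lp > rp then some [lp, rp] else none)))) with
  | some v => v
  | none => []

def get_correct_orders (rules : List (Int × List Int)) (matrix : List (List Int)) : List Int :=
  let rd := PySem.Dict.ofList rules
  (matrix.foldl (fun (s : List Int × Int) arr =>
      ((if inRightOrder rd (buildMp arr) = [] then s.1 ++ [s.2] else s.1), s.2 + 1))
    ([], 0)).1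

-- ===== PORT B =====
-- row_ok: one pass with a 'seen' set; early return False ported as recursion
def scanRow (rd : PySem.Dict Int (List Int)) : List Int → PySem.Set Int → Bool
  | [], _ => true
  | v :: rest, seen =>
      if (rd.getD v []).any (fun n => PySem.Set.contains seen n) then false
      else scanRow rd rest (PySem.Set.add seen v)

def get_correct_orders_alt (rules : List (Int × List Int)) (matrix : List (List Int)) : List Int :=
  let rd := PySem.Dict.ofList rules
  (PySem.List.enumerate matrix 0).filterMap
    (fun p => if scanRow rd p.2 PySem.Set.empty then some p.1 else none)

-- ===== PRECONDITION & SPEC =====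
def Spec_get_correct_orders (rules : List (Int × List Int)) (matrix : List (List Int)) (out : List Int) : Prop := out = get_correct_orders_alt rules matrix
instance (rules : List (Int × List Int)) (matrix : List (List Int)) (out : List Int) : Decidable (Spec_get_correct_orders rules matrix out) := by unfold Spec_get_correct_orders; infer_instance

-- ===== CLAIM (what is proved, stated in full; the proofs are below) =====
def Claim_equal_get_correct_orders : Prop := ∀ (rules : List (Int × List Int)) (matrix : List (List Int)), Dom_get_correct_orders rules matrix → Spec_get_correct_orders rules matrix (get_correct_orders rules matrix)

-- ===== LEMMAS AND PROOFS =====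

-- the positions of v in arr, offset by i (specification of build_mp's lists)
def posOf (arr : List Int) (v : Int) (i : Int) : List Int :=
  match arr with
  | [] => []
  | a :: t => if a = v then i :: posOf t v (i + 1) else posOf t v (i + 1)

lemma buildMp_fold (arr : List Int) (mp : PySem.Dict Int (List Int)) (i : Int) (v : Int) :
    ((arr.foldl (fun (s : PySem.Dict Int (List Int) × Int) x =>
        (s.1.insert x (s.1.getD x [] ++ [s.2]), s.2 + 1)) (mp, i)).1).getD v []
      = mp.getD v [] ++ posOf arr v i := by
  induction arr generalizing mp i with
  | nil => simp [posOf]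
  | cons a t ih =>
      simp only [List.foldl_cons]
      rw [ih, PySem.Dict.getD_insert]
      by_cases hv : v = a
      · subst hv; simp [posOf]
      · rw [if_neg hv]
        have hav : ¬ a = v := fun h => hv h.symm
        simp [posOf, hav]

lemma buildMp_getD (arr : List Int) (v : Int) :
    (buildMp arr).getD v [] = posOf arr v 0 := by
  unfold buildMp
  rw [buildMp_fold]
  simp [PySem.Dict.getD_empty]

lemma mem_posOf (arr : List Int) (v : Int) (i p : Int) :
    p ∈ posOf arr v i ↔ ∃ (j : Nat), ∃ (hj : j < arr.length), arr[j] = v ∧ p = i + j := by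
  induction arr generalizing i with
  | nil => simp [posOf]
  | cons a t ih =>
      constructor
      · intro h
        unfold posOf at h
        by_cases ha : a = v
        · rw [if_pos ha] at h
          rcases List.mem_cons.mp h with h | h
          · exact ⟨0, by simp, by simpa using ha, by omega⟩
          · obtain ⟨j, hj, hjv, hp⟩ := (ih (i + 1)).mp h
            exact ⟨j + 1, by simpa using Nat.succ_lt_succ hj, by simpa using hjv, by push_cast; omega⟩
        · rw [if_neg ha] at h
          obtain ⟨j, hj, hjv, hp⟩ := (ih (i + 1)).mp h
          exact ⟨j + 1, by simpa using Nat.succ_lt_succ hj, by simpa using hjv, by push_cast; omega⟩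
      · rintro ⟨j, hj, hjv, hp⟩
        unfold posOf
        cases j with
        | zero =>
            simp only [List.getElem_cons_zero] at hjv
            rw [if_pos hjv]
            exact List.mem_cons.mpr (Or.inl (by omega))
        | succ k =>
            simp only [List.getElem_cons_succ] at hjv
            have hk : k < t.length := by simp at hj; omega
            have : p ∈ posOf t v (i + 1) :=
              (ih (i + 1)).mpr ⟨k, hk, hjv, by push_cast at hp ⊢; omega⟩
            by_cases ha : a = v
            · rw [if_pos ha]; exact List.mem_cons.mpr (Or.inr this)
            · rw [if_neg ha]; exact this

-- "no violation": no earlier occurrence of a rule successor of any page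
def NoViol (rd : PySem.Dict Int (List Int)) (arr : List Int) : Prop :=
  ∀ (p : Nat) (hp : p < arr.length), ∀ n ∈ rd.getD arr[p] [], n ∉ arr.take p

lemma body_ne_nil (mp : PySem.Dict Int (List Int)) (kv : Int × List Int) (v : List Int)
    (h : (match mp.get? kv.1 with
      | none => none
      | some poss =>
        poss.findSome? (fun lp =>
          kv.2.findSome? (fun rn =>
            match mp.get? rn with
            | none => none
            | some rposs =>
              rposs.findSome? (fun rp => if lp > rp then some [lp, rp] else none)))) = some v) :
    v ≠ [] := by
  rcases hk : mp.get? kv.1 with _ | poss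
  · rw [hk] at h; exact absurd h (by simp)
  · rw [hk] at h
    obtain ⟨lp, _, h1⟩ := List.exists_of_findSome?_eq_some h
    obtain ⟨rn, _, h2⟩ := List.exists_of_findSome?_eq_some h1
    rcases hr : mp.get? rn with _ | rposs
    · rw [hr] at h2; exact absurd h2 (by simp)
    · rw [hr] at h2
      obtain ⟨rp, _, h3⟩ := List.exists_of_findSome?_eq_some h2
      by_cases hgt : lp > rp
      · rw [if_pos hgt] at h3
        simp only [Option.some.injEq] at h3
        subst h3; simp
      · rw [if_neg hgt] at h3; exact absurd h3 (by simp)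

lemma irO_iff (rd mp : PySem.Dict Int (List Int)) (hnd : rd.keys.Nodup) :
    inRightOrder rd mp = [] ↔
      ∀ (k lp : Int), lp ∈ mp.getD k [] → ∀ n ∈ rd.getD k [], ∀ rp ∈ mp.getD n [], ¬ lp > rp := by
  unfold inRightOrder
  rcases houter : rd.items.findSome? _ with _ | v
  · simp only []
    rw [List.findSome?_eq_none_iff] at houter
    constructor
    · intro _ k lp hlp n hn rp hrp hgt
      rcases hk : rd.get? k with _ | nums
      · rw [PySem.Dict.getD_eq_get?_getD, hk] at hn; simp at hn
      · rw [PySem.Dict.getD_eq_get?_getD, hk] at hn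
        have hmem := PySem.Dict.mem_items_of_get?_eq_some (d := rd) hk
        have hbody := houter (k, nums) hmem
        rcases hmk : mp.get? k with _ | poss
        · rw [PySem.Dict.getD_eq_get?_getD, hmk] at hlp; simp at hlp
        · rw [PySem.Dict.getD_eq_get?_getD, hmk] at hlp
          simp only [hmk] at hbody
          rw [List.findSome?_eq_none_iff] at hbody
          have h1 := hbody lp hlp
          rw [List.findSome?_eq_none_iff] at h1
          have h2 := h1 n (by simpa using hn)
          rcases hmn : mp.get? n with _ | rposs
          · rw [PySem.Dict.getD_eq_get?_getD, hmn] at hrp; simp at hrp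
          · rw [PySem.Dict.getD_eq_get?_getD, hmn] at hrp
            simp only [hmn] at h2
            rw [List.findSome?_eq_none_iff] at h2
            have h3 := h2 rp hrp
            rw [if_pos hgt] at h3
            exact absurd h3 (by simp)
    · intro _; trivial
  · simp only []
    obtain ⟨kv, hkv, hb⟩ := List.exists_of_findSome?_eq_some houter
    constructor
    · intro hv; exact absurd hv (body_ne_nil mp kv v hb)
    · intro hall
      exfalso
      rcases hmk : mp.get? kv.1 with _ | poss
      · rw [hmk] at hb; exact absurd hb (by simp)
      · rw [hmk] at hb
        obtain ⟨lp, hlp, h1⟩ := List.exists_of_findSome?_eq_some hb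
        obtain ⟨n, hn, h2⟩ := List.exists_of_findSome?_eq_some h1
        rcases hmn : mp.get? n with _ | rposs
        · rw [hmn] at h2; exact absurd h2 (by simp)
        · rw [hmn] at h2
          obtain ⟨rp, hrp, h3⟩ := List.exists_of_findSome?_eq_some h2
          by_cases hgt : lp > rp
          · refine hall kv.1 lp ?_ n ?_ rp ?_ hgt
            · rw [PySem.Dict.getD_eq_get?_getD, hmk]; exact hlp
            · rw [PySem.Dict.getD_of_mem_items (d := rd) hkv hnd]; exact hn
            · rw [PySem.Dict.getD_eq_get?_getD, hmn]; exact hrp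
          · rw [if_neg hgt] at h3; exact absurd h3 (by simp)

lemma mem_take_iff (arr : List Int) (p : Nat) (n : Int) :
    n ∈ arr.take p ↔ ∃ (q : Nat), ∃ (hq : q < arr.length), q < p ∧ arr[q] = n := by
  rw [List.mem_iff_getElem]
  constructor
  · rintro ⟨q, hq, hv⟩
    have hlen : q < arr.length ∧ q < p := by
      have := hq; rw [List.length_take] at this; omega
    refine ⟨q, hlen.1, hlen.2, ?_⟩
    rw [← hv, List.getElem_take]
  · rintro ⟨q, hq, hqp, hv⟩
    refine ⟨q, by rw [List.length_take]; omega, ?_⟩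
    rw [List.getElem_take]; exact hv

lemma A_char (rules : List (Int × List Int)) (arr : List Int) :
    inRightOrder (PySem.Dict.ofList rules) (buildMp arr) = [] ↔
      NoViol (PySem.Dict.ofList rules) arr := by
  rw [irO_iff _ _ (PySem.Dict.nodup_keys_ofList rules)]
  constructor
  · intro h p hp n hn hmem
    obtain ⟨q, hq, hqp, hqv⟩ := (mem_take_iff arr p n).mp hmem
    have hlp : (p : Int) ∈ (buildMp arr).getD (arr[p]) [] := by
      rw [buildMp_getD, mem_posOf]
      exact ⟨p, hp, rfl, by omega⟩
    have hrp : (q : Int) ∈ (buildMp arr).getD n [] := by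
      rw [buildMp_getD, mem_posOf]
      exact ⟨q, hq, hqv, by omega⟩
    exact h (arr[p]) p hlp n hn q hrp (by exact_mod_cast hqp)
  · intro h k lp hlp n hn rp hrp hgt
    rw [buildMp_getD, mem_posOf] at hlp hrp
    obtain ⟨j1, hj1, hj1v, hlpj⟩ := hlp
    obtain ⟨j2, hj2, hj2v, hrpj⟩ := hrp
    have hjj : j2 < j1 := by omega
    refine h j1 hj1 n (by rw [hj1v]; exact hn) ?_
    exact (mem_take_iff arr j1 n).mpr ⟨j2, hj2, hjj, hj2v⟩

lemma scanRow_iff (rd : PySem.Dict Int (List Int)) (arr : List Int) (seen : PySem.Set Int) :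
    scanRow rd arr seen = true ↔
      ∀ (p : Nat) (hp : p < arr.length), ∀ n ∈ rd.getD arr[p] [],
        ¬(n ∈ seen ∨ n ∈ arr.take p) := by
  induction arr generalizing seen with
  | nil => simp [scanRow]
  | cons v rest ih =>
      unfold scanRow
      by_cases hany : (rd.getD v []).any (fun n => PySem.Set.contains seen n) = true
      · rw [if_pos hany]
        obtain ⟨n, hn, hc⟩ := List.any_eq_true.mp hany
        constructor
        · intro h; exact absurd h (by simp)
        · intro hall
          exfalso
          exact hall 0 (by simp) n (by simpa using hn)
            (Or.inl ((PySem.Set.contains_iff _ _).mp hc))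
      · rw [if_neg hany, ih]
        have hnone : ∀ n ∈ rd.getD v [], n ∉ seen := by
          intro n hn hmem
          exact hany (List.any_eq_true.mpr ⟨n, hn, (PySem.Set.contains_iff _ _).mpr hmem⟩)
        constructor
        · intro h p hp n hn hbad
          match p with
          | 0 =>
              simp only [List.getElem_cons_zero] at hn
              rcases hbad with hbad | hbad
              · exact hnone n hn hbad
              · simp at hbad
          | Nat.succ j =>
              simp only [List.getElem_cons_succ] at hn
              have hj : j < rest.length := by simpa using hp
              refine h j hj n hn ?_
              rcases hbad with hbad | hbad
              · exact Or.inl ((PySem.Set.mem_add _ _ _).mpr (Or.inl hbad))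
              · simp only [List.take_succ_cons, List.mem_cons] at hbad
                rcases hbad with hbad | hbad
                · exact Or.inl ((PySem.Set.mem_add _ _ _).mpr (Or.inr hbad))
                · exact Or.inr hbad
        · intro h j hj n hn hbad
          have hj' : j + 1 < (v :: rest).length := by simpa using Nat.succ_lt_succ hj
          refine h (j + 1) hj' n (by simpa using hn) ?_
          rcases hbad with hbad | hbad
          · rcases (PySem.Set.mem_add _ _ _).mp hbad with hbad | hbad
            · exact Or.inl hbad
            · exact Or.inr (by simp [List.take_succ_cons, hbad])
          · exact Or.inr (by simp [List.take_succ_cons, hbad])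

lemma row_iff (rules : List (Int × List Int)) (arr : List Int) :
    (inRightOrder (PySem.Dict.ofList rules) (buildMp arr) = [])
      ↔ scanRow (PySem.Dict.ofList rules) arr PySem.Set.empty = true := by
  rw [A_char, scanRow_iff]
  unfold NoViol
  constructor
  · intro h p hp n hn hbad
    rcases hbad with hbad | hbad
    · simp [PySem.Set.empty] at hbad
    · exact h p hp n hn hbad
  · intro h p hp n hn hbad
    exact h p hp n hn (Or.inr hbad)

lemma outer_fold (rules : List (Int × List Int)) (matrix : List (List Int))
    (acc : List Int) (i : Int) :
    (matrix.foldl (fun (s : List Int × Int) arr =>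
        ((if inRightOrder (PySem.Dict.ofList rules) (buildMp arr) = [] then s.1 ++ [s.2] else s.1), s.2 + 1))
      (acc, i)).1
    = acc ++ (PySem.List.enumerate matrix i).filterMap
        (fun p => if scanRow (PySem.Dict.ofList rules) p.2 PySem.Set.empty then some p.1 else none) := by
  induction matrix generalizing acc i with
  | nil => simp [PySem.List.enumerate_nil]
  | cons a t ih =>
      simp only [List.foldl_cons]
      rw [ih, PySem.List.enumerate_cons, List.filterMap_cons]
      by_cases hc : inRightOrder (PySem.Dict.ofList rules) (buildMp a) = []
      · rw [if_pos hc]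
        simp only [(row_iff rules a).mp hc, if_pos]
        simp
      · rw [if_neg hc]
        have hb : scanRow (PySem.Dict.ofList rules) a PySem.Set.empty = false := by
          rcases h : scanRow (PySem.Dict.ofList rules) a PySem.Set.empty
          · rfl
          · exact absurd ((row_iff rules a).mpr h) hc
        simp only [hb]
        simp

-- ===== VERDICT (by name: the statement is the Claim_ definition above) =====
theorem get_correct_orders_spec : Claim_equal_get_correct_orders := by
  intro rules matrix _
  unfold Spec_get_correct_orders get_correct_orders get_correct_orders_alt
  simp only []
  rw [outer_fold]
  simp
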